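-- pv_equiv track=rewrite | github.com/kek-Sec/AdventOfCode2025 | day-1/test_1.py | solve
-- ===== SOURCE A (Python) =====
-- def solve(rotations, start=50):
--     """Original solution logic"""
--     position = start
--     count_zeros = 0
--     for rotation in rotations:
--         direction = rotation[0]
--         distance = int(rotation[1:])
--         if direction == 'L':
--             position = (position - distance) % 100
--         else:
--             position = (position + distance) % 100
--         if position == 0:
--             count_zeros += 1
--     return count_zeros
-- ===== SOURCE B (Python) =====
-- def solve(rotations, start=50):
--     """Divide-and-conquer: each half reports (end position, zero count); combine."""
--     deltas = [-int(r[1:]) if r[0] == 'L' else int(r[1:]) for r in rotations]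
--
--     def count(lo, hi, pos):
--         if hi - lo == 1:
--             p = (pos + deltas[lo]) % 100
--             return p, (1 if p == 0 else 0)
--         mid = (lo + hi) // 2
--         p1, c1 = count(lo, mid, pos)
--         p2, c2 = count(mid, hi, p1)
--         return p2, c1 + c2
--
--     if not rotations:
--         return 0
--     return count(0, len(rotations), start)[1]
-- ===== Notes on version B (the rewrite author's own statement) =====
-- stated objective: alternative
-- what changed: Replaced A's fused left-to-right loop (stepwise mod-100 position with an inline zero counter) by a divide-and-conquer recursion over index halves: each half of the delta array returns (end position, zero count) and the results are combined, with an up-front parsing pass into signed deltas.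
import Mathlib
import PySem

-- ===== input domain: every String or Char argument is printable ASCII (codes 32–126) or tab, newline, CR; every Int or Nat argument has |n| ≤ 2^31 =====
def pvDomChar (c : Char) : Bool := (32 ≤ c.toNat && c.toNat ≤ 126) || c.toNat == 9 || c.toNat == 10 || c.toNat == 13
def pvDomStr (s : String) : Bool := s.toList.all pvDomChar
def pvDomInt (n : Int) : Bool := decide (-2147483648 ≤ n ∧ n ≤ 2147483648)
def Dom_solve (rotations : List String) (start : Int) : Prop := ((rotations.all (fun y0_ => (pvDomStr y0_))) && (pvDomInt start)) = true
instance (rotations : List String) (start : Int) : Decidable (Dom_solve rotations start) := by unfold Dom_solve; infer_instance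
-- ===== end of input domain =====

-- B replaces A's fused left-to-right counting loop by a divide-and-conquer recursion
-- over halves of a pre-parsed signed-delta array (alternative decomposition, same cost).

-- ===== PORT A =====
-- loop body of A's for-loop, named as a helper
def solveLoop (s : Int × Int) (rotation : String) : Int × Int :=
  let position := s.1
  let count_zeros := s.2
  let direction := PySem.Str.pyGet? rotation 0
  let distance := (PySem.Int.ofStr? (PySem.Str.slice rotation (some 1) none)).getD 0
  let position :=
    if direction = some 'L' then PySem.Int.mod (position - distance) 100
    else PySem.Int.mod (position + distance) 100
  if position = 0 then (position, count_zeros + 1) else (position, count_zeros)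

def solve (rotations : List String) (start : Int) : Int :=
  (rotations.foldl solveLoop (start, 0)).2

-- ===== PORT B =====
-- signed delta of one rotation: -int(r[1:]) if r[0]=='L' else int(r[1:])
def solveDelta (r : String) : Int :=
  if PySem.Str.pyGet? r 0 = some 'L' then
    -((PySem.Int.ofStr? (PySem.Str.slice r (some 1) none)).getD 0)
  else (PySem.Int.ofStr? (PySem.Str.slice r (some 1) none)).getD 0

-- Source B's inner 'count(lo, hi, pos)': the index range [lo, hi) becomes the sub-list of
-- deltas it denotes; the [] case is a totality guard (Source B never calls count on an
-- empty range: the top level returns 0 for empty input and mid splits are proper).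
def solveCount (ds : List Int) (pos : Int) : Int × Int :=
  match h : ds with
  | [] => (pos, 0)
  | [d] =>
    let p := PySem.Int.mod (pos + d) 100
    (p, if p = 0 then 1 else 0)
  | _ :: _ :: _ =>
    let m := ds.length / 2
    let r1 := solveCount (ds.take m) pos
    let r2 := solveCount (ds.drop m) r1.1
    (r2.1, r1.2 + r2.2)
termination_by ds.length
decreasing_by
  · subst h; simp [List.length_take]; omega
  · subst h; simp [List.length_drop]; omega

def solve_alt (rotations : List String) (start : Int) : Int :=
  let deltas := rotations.map solveDelta
  if rotations = [] then 0 else (solveCount deltas start).2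

-- ===== PRECONDITION & SPEC =====
-- Pre_ excludes exactly the inputs where Python A raises: an empty rotation string
-- (IndexError on rotation[0]) or a rotation whose tail is not int-parsable (ValueError).
def Pre_solve (rotations : List String) (start : Int) : Prop :=
  ∀ r ∈ rotations, r ≠ "" ∧ (PySem.Int.ofStr? (PySem.Str.slice r (some 1) none)).isSome
instance (rotations : List String) (start : Int) : Decidable (Pre_solve rotations start) := by
  unfold Pre_solve; infer_instance

def pvWitness_solve : List String × Int := (["R50", "L25"], 50)

def Spec_solve (rotations : List String) (start : Int) (out : Int) : Prop := out = solve_alt rotations start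
instance (rotations : List String) (start : Int) (out : Int) : Decidable (Spec_solve rotations start out) := by unfold Spec_solve; infer_instance

-- ===== CLAIM (what is proved, stated in full; the proofs are below) =====
def Claim_equal_solve : Prop := ∀ (rotations : List String) (start : Int), Dom_solve rotations start → Pre_solve rotations start → Spec_solve rotations start (solve rotations start)

-- ===== LEMMAS AND PROOFS =====

-- A's loop body, expressed on the signed delta of the rotation
def stepD (s : Int × Int) (d : Int) : Int × Int :=
  let p := PySem.Int.mod (s.1 + d) 100
  (p, if p = 0 then s.2 + 1 else s.2)

lemma solveLoop_eq_stepD (s : Int × Int) (r : String) :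
    solveLoop s r = stepD s (solveDelta r) := by
  by_cases h : PySem.List.pyGet? r.toList 0 = some 'L' <;>
    (simp [solveLoop, stepD, solveDelta, PySem.Str.pyGet?, h, sub_eq_add_neg]; split <;> simp)

-- the zero counter of A's loop is an accumulator: starting it at c just adds c
lemma foldl_stepD_shift (ds : List Int) : ∀ (p c : Int),
    ds.foldl stepD (p, c) = ((ds.foldl stepD (p, 0)).1, c + (ds.foldl stepD (p, 0)).2) := by
  induction ds with
  | nil => intro p c; simp
  | cons d ds ih =>
    intro p c
    simp only [List.foldl_cons, stepD]
    by_cases h : PySem.Int.mod (p + d) 100 = 0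
    · rw [if_pos h, if_pos h, ih _ (c + 1), ih _ (0 + 1)]
      simp only [Prod.mk.injEq, true_and]
      ring
    · rw [if_neg h, if_neg h, ih _ c]

-- main lemma: B's divide-and-conquer over a delta list computes exactly A's fold
lemma solveCount_eq_foldl : ∀ (n : Nat) (ds : List Int), ds.length = n →
    ∀ pos, solveCount ds pos = ds.foldl stepD (pos, 0) := by
  intro n
  induction n using Nat.strong_induction_on with
  | _ n ih =>
    intro ds hlen pos
    match ds with
    | [] => simp [solveCount]
    | [d] => simp [solveCount, stepD]
    | d1 :: d2 :: rest =>
      rw [solveCount]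
      have hm : (d1 :: d2 :: rest).length / 2 < (d1 :: d2 :: rest).length := by
        simp; omega
      have hm1 : 1 ≤ (d1 :: d2 :: rest).length / 2 := by simp; omega
      set l := d1 :: d2 :: rest with hl
      set m := l.length / 2 with hmdef
      have htake : (l.take m).length < n := by
        rw [← hlen]; simp [List.length_take]; omega
      have hdrop : (l.drop m).length < n := by
        rw [← hlen]; simp [List.length_drop]; omega
      rw [ih _ htake _ rfl, ih _ hdrop _ rfl]
      have hsplit : l = l.take m ++ l.drop m := (List.take_append_drop m l).symm
      conv_rhs => rw [hsplit]
      rw [List.foldl_append]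
      rw [foldl_stepD_shift (l.drop m) ((l.take m).foldl stepD (pos, 0)).1
            ((l.take m).foldl stepD (pos, 0)).2]

-- A's fold over rotations equals the delta-fold over the mapped list
lemma foldl_solveLoop_map (l : List String) : ∀ s,
    l.foldl solveLoop s = (l.map solveDelta).foldl stepD s := by
  induction l with
  | nil => intro s; rfl
  | cons r l ih => intro s; simp [List.foldl_cons, solveLoop_eq_stepD, ih]

-- ===== VERDICT (by name: the statement is the Claim_ definition above) =====
theorem solve_spec : Claim_equal_solve := by
  intro rotations start _ _
  unfold Spec_solve solve solve_alt
  cases hr : rotations with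
  | nil => simp
  | cons r rs =>
    simp only [if_neg (by simp : (r :: rs : List String) ≠ [])]
    rw [solveCount_eq_foldl ((r :: rs).map solveDelta).length _ rfl,
      foldl_solveLoop_map]
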